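-- pv_equiv track=rewrite | github.com/lazydancer/Advent-of-Code-2019 | Day-10/solution.py | ring
-- ===== SOURCE A (Python) =====
-- def ring(tl_loc, width):
-- 	x, y = tl_loc
--
-- 	result = set()
--
-- 	for i in range(width):
-- 		result.add((tl_loc[0] + i, tl_loc[1]))
-- 	for i in range(1, width):
-- 		result.add((tl_loc[0] + width-1, tl_loc[1] + i))
-- 	for i in range(1, width):
-- 		result.add((tl_loc[0] + width-1 - i, tl_loc[1] +  width-1))
-- 	for i in range(1, width-1):
-- 		result.add((tl_loc[0], tl_loc[1] + width-1 - i))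
--
-- 	return result
-- ===== SOURCE B (Python) =====
-- def ring(tl_loc, width):
--     # Boundary-following walker: keep a position and a direction, turn
--     # clockwise whenever the next step leaves the square, stop on returning
--     # to the start.
--     x, y = tl_loc
--     if width < 1:
--         return set()
--
--     def inside(px, py):
--         return x <= px <= x + width - 1 and y <= py <= y + width - 1
--
--     pts = []
--     cx, cy = x, y
--     dx, dy = 1, 0
--     while True:
--         pts.append((cx, cy))
--         nx, ny = cx + dx, cy + dy
--         if not inside(nx, ny):
--             dx, dy = -dy, dx
--             nx, ny = cx + dx, cy + dy
--         if (nx, ny) == (x, y) or not inside(nx, ny):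
--             break
--         cx, cy = nx, ny
--     return set(pts)
-- ===== Notes on version B (the rewrite author's own statement) =====
-- stated objective: alternative
-- what changed: Replaces the four per-edge loops with a boundary-following walker: a single loop that maintains a position and a direction, turns clockwise whenever the next step would leave the square, and stops on returning to the start.
import Mathlib
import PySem

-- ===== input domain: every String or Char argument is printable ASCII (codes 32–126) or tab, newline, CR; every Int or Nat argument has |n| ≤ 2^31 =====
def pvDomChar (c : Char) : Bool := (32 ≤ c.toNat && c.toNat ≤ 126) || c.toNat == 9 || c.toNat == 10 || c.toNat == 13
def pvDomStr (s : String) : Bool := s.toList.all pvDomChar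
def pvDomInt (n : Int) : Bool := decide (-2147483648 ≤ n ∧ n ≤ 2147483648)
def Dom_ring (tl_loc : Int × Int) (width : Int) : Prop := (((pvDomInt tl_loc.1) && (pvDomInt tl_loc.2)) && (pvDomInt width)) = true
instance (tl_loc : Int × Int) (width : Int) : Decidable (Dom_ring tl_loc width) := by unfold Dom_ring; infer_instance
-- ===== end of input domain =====

-- B replaces A's four per-edge loops by a boundary-following walker that keeps a
-- position and a direction, turning clockwise at the corners (objective: alternative).


-- ===== PORT A =====
-- literal port of Source A: four edge loops adding into a set
def ring (tl_loc : Int × Int) (width : Int) : List (Int × Int) :=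
  let result : PySem.Set (Int × Int) := PySem.Set.empty
  let result := (PySem.List.pyRange 0 width 1).foldl
    (fun s i => PySem.Set.add s (tl_loc.1 + i, tl_loc.2)) result
  let result := (PySem.List.pyRange 1 width 1).foldl
    (fun s i => PySem.Set.add s (tl_loc.1 + width - 1, tl_loc.2 + i)) result
  let result := (PySem.List.pyRange 1 width 1).foldl
    (fun s i => PySem.Set.add s (tl_loc.1 + width - 1 - i, tl_loc.2 + width - 1)) result
  let result := (PySem.List.pyRange 1 (width - 1) 1).foldl
    (fun s i => PySem.Set.add s (tl_loc.1, tl_loc.2 + width - 1 - i)) result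
  result

-- ===== PORT B =====
-- helper = Source B's inner 'inside': is (px, py) inside the square?
def inB (x y w px py : Int) : Bool :=
  decide (x ≤ px ∧ px ≤ x + w - 1 ∧ y ≤ py ∧ py ≤ y + w - 1)

-- Source B's 'while True' walker loop, with a fuel guard making it total (the fuel
-- passed by ring_alt is never exhausted: the walk emits at most 4*width-4 points).
-- Body = Source B's body: append the point; if the straight step leaves the square,
-- turn clockwise; stop if the (possibly turned) step reaches the start or leaves
-- the square, else move there.
def walk (x y w : Int) (fuel : Nat) (cx cy dx dy : Int) : List (Int × Int) :=
  match fuel with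
  | 0 => []
  | f + 1 =>
    if inB x y w (cx + dx) (cy + dy) then
      if cx + dx = x ∧ cy + dy = y then [(cx, cy)]
      else (cx, cy) :: walk x y w f (cx + dx) (cy + dy) dx dy
    else
      if (cx + -dy = x ∧ cy + dx = y) ∨ inB x y w (cx + -dy) (cy + dx) = false then [(cx, cy)]
      else (cx, cy) :: walk x y w f (cx + -dy) (cy + dx) (-dy) dx

def ring_alt (tl_loc : Int × Int) (width : Int) : List (Int × Int) :=
  if width < 1 then PySem.Set.empty
  else PySem.Set.ofList
    (walk tl_loc.1 tl_loc.2 width (4 * width).toNat tl_loc.1 tl_loc.2 1 0)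

-- ===== PRECONDITION & SPEC =====
def Spec_ring (tl_loc : Int × Int) (width : Int) (out : List (Int × Int)) : Prop := out = ring_alt tl_loc width
instance (tl_loc : Int × Int) (width : Int) (out : List (Int × Int)) : Decidable (Spec_ring tl_loc width out) := by unfold Spec_ring; infer_instance

-- ===== CLAIM (what is proved, stated in full; the proofs are below) =====
def Claim_equal_ring : Prop := ∀ (tl_loc : Int × Int) (width : Int), Dom_ring tl_loc width → Spec_ring tl_loc width (ring tl_loc width)

-- ===== LEMMAS AND PROOFS =====

-- segments of the perimeter in A's insertion order (proof-side helpers only)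
def seg1 (x y w : Int) : List (Int × Int) := (PySem.List.pyRange 0 w 1).map (fun i => (x + i, y))
def seg2 (x y w : Int) : List (Int × Int) := (PySem.List.pyRange 1 w 1).map (fun i => (x + w - 1, y + i))
def seg3 (x y w : Int) : List (Int × Int) := (PySem.List.pyRange 1 w 1).map (fun i => (x + w - 1 - i, y + w - 1))
def seg4 (x y w : Int) : List (Int × Int) := (PySem.List.pyRange 1 (w - 1) 1).map (fun i => (x, y + w - 1 - i))

-- the common closed-form list both ports produce
def ringL (x y w : Int) : List (Int × Int) := seg1 x y w ++ seg2 x y w ++ seg3 x y w ++ seg4 x y w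

lemma set_add_of_not_mem {a : Type} [BEq a] [LawfulBEq a] (s : PySem.Set a) (x : a)
    (h : x ∉ s) : PySem.Set.add s x = s ++ [x] := by
  simp [PySem.Set.add, PySem.Set.contains, h]

lemma foldl_add_map {a b : Type} [BEq b] [LawfulBEq b] (l : List a) (f : a → b) :
    ∀ (s : PySem.Set b), (∀ t ∈ l, f t ∉ s) → (l.map f).Nodup →
    l.foldl (fun s t => PySem.Set.add s (f t)) s = s ++ l.map f := by
  induction l with
  | nil => intro s _ _; simp
  | cons c t ih =>
    intro s hdisj hnd
    simp only [List.map_cons, List.nodup_cons, List.mem_map] at hnd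
    have hc : f c ∉ s := hdisj c (by simp)
    simp only [List.foldl_cons]
    rw [set_add_of_not_mem s (f c) hc,
        ih (s ++ [f c]) (by
          intro u hu
          simp only [List.mem_append, List.mem_singleton]
          rintro (h | h)
          · exact hdisj u (by simp [hu]) h
          · exact hnd.1 ⟨u, hu, h⟩) hnd.2]
    simp

lemma ofList_of_nodup {a : Type} [BEq a] [LawfulBEq a] (l : List a) (h : l.Nodup) :
    PySem.Set.ofList l = l := by
  rw [PySem.Set.ofList_eq_foldl]
  have := foldl_add_map l id [] (by simp) (by simpa using h)
  simpa using this

lemma nodup_seg1 (x y w : Int) : (seg1 x y w).Nodup :=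
  (PySem.List.nodup_pyRange_one 0 w).map (fun p q h => by
    simp only [Prod.mk.injEq] at h; omega)
lemma nodup_seg2 (x y w : Int) : (seg2 x y w).Nodup :=
  (PySem.List.nodup_pyRange_one 1 w).map (fun p q h => by
    simp only [Prod.mk.injEq] at h; omega)
lemma nodup_seg3 (x y w : Int) : (seg3 x y w).Nodup :=
  (PySem.List.nodup_pyRange_one 1 w).map (fun p q h => by
    simp only [Prod.mk.injEq] at h; omega)
lemma nodup_seg4 (x y w : Int) : (seg4 x y w).Nodup :=
  (PySem.List.nodup_pyRange_one 1 (w - 1)).map (fun p q h => by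
    simp only [Prod.mk.injEq] at h; omega)

lemma disj_seg21 (x y w : Int) : List.Disjoint (seg2 x y w) (seg1 x y w) := by
  intro p ha hb
  simp only [seg1, seg2, List.mem_map, PySem.List.mem_pyRange_one, Prod.ext_iff] at ha hb
  obtain ⟨i, ⟨hi1, hi2⟩, ha1, ha2⟩ := ha
  obtain ⟨j, ⟨hj1, hj2⟩, hb1, hb2⟩ := hb
  omega

lemma disj_seg31 (x y w : Int) : List.Disjoint (seg3 x y w) (seg1 x y w) := by
  intro p ha hb
  simp only [seg1, seg3, List.mem_map, PySem.List.mem_pyRange_one, Prod.ext_iff] at ha hb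
  obtain ⟨i, ⟨hi1, hi2⟩, ha1, ha2⟩ := ha
  obtain ⟨j, ⟨hj1, hj2⟩, hb1, hb2⟩ := hb
  omega

lemma disj_seg32 (x y w : Int) : List.Disjoint (seg3 x y w) (seg2 x y w) := by
  intro p ha hb
  simp only [seg2, seg3, List.mem_map, PySem.List.mem_pyRange_one, Prod.ext_iff] at ha hb
  obtain ⟨i, ⟨hi1, hi2⟩, ha1, ha2⟩ := ha
  obtain ⟨j, ⟨hj1, hj2⟩, hb1, hb2⟩ := hb
  omega

lemma disj_seg41 (x y w : Int) : List.Disjoint (seg4 x y w) (seg1 x y w) := by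
  intro p ha hb
  simp only [seg1, seg4, List.mem_map, PySem.List.mem_pyRange_one, Prod.ext_iff] at ha hb
  obtain ⟨i, ⟨hi1, hi2⟩, ha1, ha2⟩ := ha
  obtain ⟨j, ⟨hj1, hj2⟩, hb1, hb2⟩ := hb
  omega

lemma disj_seg42 (x y w : Int) : List.Disjoint (seg4 x y w) (seg2 x y w) := by
  intro p ha hb
  simp only [seg2, seg4, List.mem_map, PySem.List.mem_pyRange_one, Prod.ext_iff] at ha hb
  obtain ⟨i, ⟨hi1, hi2⟩, ha1, ha2⟩ := ha
  obtain ⟨j, ⟨hj1, hj2⟩, hb1, hb2⟩ := hb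
  omega

lemma disj_seg43 (x y w : Int) : List.Disjoint (seg4 x y w) (seg3 x y w) := by
  intro p ha hb
  simp only [seg3, seg4, List.mem_map, PySem.List.mem_pyRange_one, Prod.ext_iff] at ha hb
  obtain ⟨i, ⟨hi1, hi2⟩, ha1, ha2⟩ := ha
  obtain ⟨j, ⟨hj1, hj2⟩, hb1, hb2⟩ := hb
  omega

lemma nodup_ringL (x y w : Int) : (ringL x y w).Nodup := by
  have toPair : ∀ {l1 l2 : List (Int × Int)}, List.Disjoint l1 l2 →
      ∀ p ∈ l1, ∀ q ∈ l2, p ≠ q := fun hd p hp q hq he => hd hp (he ▸ hq)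
  unfold ringL
  rw [List.append_assoc, List.append_assoc, List.nodup_append, List.nodup_append,
      List.nodup_append]
  refine ⟨nodup_seg1 x y w, ⟨nodup_seg2 x y w, ⟨nodup_seg3 x y w, nodup_seg4 x y w,
    toPair (disj_seg43 x y w).symm⟩, ?_⟩, ?_⟩
  · intro p hp q hq he
    rcases List.mem_append.1 hq with h | h
    · exact disj_seg32 x y w h (he ▸ hp)
    · exact disj_seg42 x y w h (he ▸ hp)
  · intro p hp q hq he
    rcases List.mem_append.1 hq with h | h
    · exact disj_seg21 x y w h (he ▸ hp)
    · rcases List.mem_append.1 h with h | h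
      · exact disj_seg31 x y w h (he ▸ hp)
      · exact disj_seg41 x y w h (he ▸ hp)

lemma ring_eq_ringL (tl_loc : Int × Int) (width : Int) :
    ring tl_loc width = ringL tl_loc.1 tl_loc.2 width := by
  obtain ⟨x, y⟩ := tl_loc
  show ring (x, y) width = ringL x y width
  unfold ring ringL
  have H1 : List.foldl (fun s i => PySem.Set.add s (x + i, y)) PySem.Set.empty
      (PySem.List.pyRange 0 width 1) = PySem.Set.empty ++ seg1 x y width := by
    rw [seg1]
    exact foldl_add_map _ _ _ (by simp [PySem.Set.empty])
      (by simpa [seg1] using nodup_seg1 x y width)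
  have H2 : List.foldl (fun s i => PySem.Set.add s (x + width - 1, y + i))
      (PySem.Set.empty ++ seg1 x y width) (PySem.List.pyRange 1 width 1) =
      PySem.Set.empty ++ seg1 x y width ++ seg2 x y width := by
    rw [seg2]
    refine foldl_add_map _ _ _ ?_ (by simpa [seg2] using nodup_seg2 x y width)
    intro t ht h
    simp only [PySem.Set.empty, List.nil_append] at h
    exact disj_seg21 x y width (by rw [seg2]; exact List.mem_map_of_mem ht) h
  have H3 : List.foldl (fun s i => PySem.Set.add s (x + width - 1 - i, y + width - 1))
      (PySem.Set.empty ++ seg1 x y width ++ seg2 x y width) (PySem.List.pyRange 1 width 1) =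
      PySem.Set.empty ++ seg1 x y width ++ seg2 x y width ++ seg3 x y width := by
    rw [seg3]
    refine foldl_add_map _ _ _ ?_ (by simpa [seg3] using nodup_seg3 x y width)
    intro t ht h
    have hm : (x + width - 1 - t, y + width - 1) ∈ seg3 x y width := by
      rw [seg3]; exact List.mem_map_of_mem ht
    simp only [PySem.Set.empty, List.nil_append, List.mem_append] at h
    rcases h with h | h
    · exact disj_seg31 x y width hm h
    · exact disj_seg32 x y width hm h
  have H4 : List.foldl (fun s i => PySem.Set.add s (x, y + width - 1 - i))
      (PySem.Set.empty ++ seg1 x y width ++ seg2 x y width ++ seg3 x y width)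
      (PySem.List.pyRange 1 (width - 1) 1) =
      PySem.Set.empty ++ seg1 x y width ++ seg2 x y width ++ seg3 x y width ++ seg4 x y width := by
    rw [seg4]
    refine foldl_add_map _ _ _ ?_ (by simpa [seg4] using nodup_seg4 x y width)
    intro t ht h
    have hm : (x, y + width - 1 - t) ∈ seg4 x y width := by
      rw [seg4]; exact List.mem_map_of_mem ht
    simp only [PySem.Set.empty, List.nil_append, List.mem_append] at h
    rcases h with (h | h) | h
    · exact disj_seg41 x y width hm h
    · exact disj_seg42 x y width hm h
    · exact disj_seg43 x y width hm h
  simp only [H1, H2, H3, H4]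
  simp [PySem.Set.empty]

-- ---- B-side: the walker traces the same list ----

lemma inB_eq_true {x y w px py : Int}
    (h : x ≤ px ∧ px ≤ x + w - 1 ∧ y ≤ py ∧ py ≤ y + w - 1) : inB x y w px py = true := by
  simpa [inB] using h

lemma inB_eq_false {x y w px py : Int}
    (h : px < x ∨ x + w - 1 < px ∨ py < y ∨ y + w - 1 < py) : inB x y w px py = false := by
  simp only [inB, decide_eq_false_iff_not]
  omega

lemma walk_straight (x y w : Int) (f : Nat) (cx cy dx dy : Int)
    (h1 : inB x y w (cx + dx) (cy + dy) = true) (h2 : ¬(cx + dx = x ∧ cy + dy = y)) :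
    walk x y w (f + 1) cx cy dx dy = (cx, cy) :: walk x y w f (cx + dx) (cy + dy) dx dy := by
  simp only [walk]
  rw [if_pos h1, if_neg h2]

lemma walk_straight_stop (x y w : Int) (f : Nat) (cx cy dx dy : Int)
    (h1 : inB x y w (cx + dx) (cy + dy) = true) (h2 : cx + dx = x ∧ cy + dy = y) :
    walk x y w (f + 1) cx cy dx dy = [(cx, cy)] := by
  simp only [walk]
  rw [if_pos h1, if_pos h2]

lemma walk_turn (x y w : Int) (f : Nat) (cx cy dx dy : Int)
    (h1 : inB x y w (cx + dx) (cy + dy) = false)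
    (h2 : inB x y w (cx + -dy) (cy + dx) = true)
    (h3 : ¬(cx + -dy = x ∧ cy + dx = y)) :
    walk x y w (f + 1) cx cy dx dy = (cx, cy) :: walk x y w f (cx + -dy) (cy + dx) (-dy) dx := by
  simp only [walk]
  rw [if_neg (by simp [h1]), if_neg (by
    rintro (h | h)
    · exact h3 h
    · rw [h2] at h; cases h)]

lemma walk_turn_stop (x y w : Int) (f : Nat) (cx cy dx dy : Int)
    (h1 : inB x y w (cx + dx) (cy + dy) = false)
    (h2 : (cx + -dy = x ∧ cy + dx = y) ∨ inB x y w (cx + -dy) (cy + dx) = false) :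
    walk x y w (f + 1) cx cy dx dy = [(cx, cy)] := by
  simp only [walk]
  rw [if_neg (by simp [h1]), if_pos h2]

-- the four sides, in the walker's (= A's) order
def topL (x y w : Int) : List (Int × Int) :=
  (List.range w.toNat).map (fun j : Nat => (x + (j : Int), y))
def downL (x y w : Int) : List (Int × Int) :=
  (List.range (w - 1).toNat).map (fun j : Nat => (x + w - 1, y + 1 + (j : Int)))
def leftL (x y w : Int) : List (Int × Int) :=
  (List.range (w - 1).toNat).map (fun j : Nat => (x + w - 2 - (j : Int), y + w - 1))
def upL (x y w : Int) : List (Int × Int) :=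
  (List.range (w - 2).toNat).map (fun j : Nat => (x, y + w - 2 - (j : Int)))

lemma map_range_ext (n : Nat) (f g : Nat → Int × Int) (h : ∀ j, j < n → f j = g j) :
    (List.range n).map f = (List.range n).map g :=
  List.map_congr_left (fun j hj => h j (List.mem_range.1 hj))

lemma walk_up (x y w : Int) (hw : 2 ≤ w) : ∀ (k fuel : Nat), (k : Int) ≤ w - 2 → k + 1 ≤ fuel →
    walk x y w fuel x (y + 1 + k) 0 (-1)
      = (List.range (k + 1)).map (fun j : Nat => ((x : Int), y + 1 + (k : Int) - (j : Int))) := by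
  intro k
  induction k with
  | zero =>
    intro fuel _ hf
    obtain ⟨f, rfl⟩ : ∃ f, fuel = f + 1 := ⟨fuel - 1, by omega⟩
    rw [walk_straight_stop x y w f x (y + 1 + ((0 : Nat) : Int)) 0 (-1)
        (inB_eq_true (by push_cast; omega)) ⟨by push_cast; ring, by push_cast; ring⟩]
    rw [show List.range (0 + 1) = [0] from rfl, List.map_cons, List.map_nil,
        List.cons.injEq]
    exact ⟨by simp only [Prod.mk.injEq, true_and, and_true]; omega, rfl⟩
  | succ k ih =>
    intro fuel hk hf
    obtain ⟨f, rfl⟩ : ∃ f, fuel = f + 1 := ⟨fuel - 1, by omega⟩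
    rw [walk_straight x y w f x (y + 1 + ((k + 1 : Nat) : Int)) 0 (-1)
        (inB_eq_true (by push_cast; omega)) (by push_cast; omega)]
    rw [show x + (0 : Int) = x from by ring,
        show y + 1 + ((k + 1 : Nat) : Int) + -1 = y + 1 + (k : Int) from by push_cast; ring]
    rw [ih f (by push_cast at hk ⊢; omega) (by omega)]
    conv_rhs => rw [List.range_succ_eq_map, List.map_cons, List.map_map]
    rw [List.cons.injEq]
    refine ⟨by simp only [Prod.mk.injEq, true_and, and_true]; omega, ?_⟩
    apply map_range_ext
    intro j _
    simp only [Function.comp_apply, Prod.mk.injEq, true_and, and_true]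
    omega

lemma walk_left (x y w : Int) (hw : 2 ≤ w) : ∀ (k fuel : Nat), (k : Int) ≤ w - 2 →
    (k + 1) + (w - 2).toNat ≤ fuel →
    walk x y w fuel (x + k) (y + w - 1) (-1) 0
      = (List.range (k + 1)).map (fun j : Nat => (x + (k : Int) - (j : Int), y + w - 1))
        ++ upL x y w := by
  intro k
  induction k with
  | zero =>
    intro fuel _ hf
    obtain ⟨f, rfl⟩ : ∃ f, fuel = f + 1 := ⟨fuel - 1, by omega⟩
    rw [show List.range (0 + 1) = [0] from rfl, List.map_cons, List.map_nil]
    simp only [List.cons_append, List.nil_append]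
    by_cases hw2 : w = 2
    · subst hw2
      rw [walk_turn_stop x y 2 f (x + ((0 : Nat) : Int)) (y + 2 - 1) (-1) 0
          (inB_eq_false (by push_cast; omega))
          (Or.inl ⟨by push_cast; ring, by push_cast; ring⟩)]
      rw [show upL x y 2 = [] from by
            unfold upL; rw [show ((2 : Int) - 2).toNat = 0 from rfl]; rfl]
      rw [List.cons.injEq]
      exact ⟨by simp only [Prod.mk.injEq, true_and, and_true]; omega, rfl⟩
    · have hw3 : 3 ≤ w := by omega
      rw [walk_turn x y w f (x + ((0 : Nat) : Int)) (y + w - 1) (-1) 0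
          (inB_eq_false (by push_cast; omega))
          (inB_eq_true (by push_cast; omega)) (by push_cast; omega)]
      rw [show x + ((0 : Nat) : Int) + -(0 : Int) = x from by push_cast; ring,
          show y + w - 1 + -1 = y + 1 + (((w - 3).toNat : Nat) : Int) from by omega,
          show -(0 : Int) = 0 from neg_zero]
      rw [walk_up x y w hw (w - 3).toNat f (by omega) (by omega)]
      rw [show (w - 3).toNat + 1 = (w - 2).toNat from by omega, List.cons.injEq]
      refine ⟨by simp only [Prod.mk.injEq, true_and, and_true]; omega, ?_⟩
      unfold upL
      apply map_range_ext
      intro j _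
      simp only [Prod.mk.injEq, true_and, and_true]
      omega
  | succ k ih =>
    intro fuel hk hf
    obtain ⟨f, rfl⟩ : ∃ f, fuel = f + 1 := ⟨fuel - 1, by omega⟩
    rw [walk_straight x y w f (x + ((k + 1 : Nat) : Int)) (y + w - 1) (-1) 0
        (inB_eq_true (by push_cast; omega)) (by push_cast; omega)]
    rw [show x + ((k + 1 : Nat) : Int) + -1 = x + (k : Int) from by push_cast; ring,
        show y + w - 1 + (0 : Int) = y + w - 1 from by ring]
    rw [ih f (by push_cast at hk ⊢; omega) (by omega)]
    conv_rhs => rw [List.range_succ_eq_map, List.map_cons, List.map_map, List.cons_append]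
    rw [List.cons.injEq]
    refine ⟨by simp only [Prod.mk.injEq, true_and, and_true]; omega, ?_⟩
    refine congrArg (fun l => l ++ upL x y w) ?_
    apply map_range_ext
    intro j _
    simp only [Function.comp_apply, Prod.mk.injEq, true_and, and_true]
    omega

lemma walk_down (x y w : Int) (hw : 2 ≤ w) : ∀ (k fuel : Nat), (k : Int) ≤ w - 2 →
    (k + 1) + ((w - 1).toNat + (w - 2).toNat) ≤ fuel →
    walk x y w fuel (x + w - 1) (y + w - 1 - k) 0 1
      = (List.range (k + 1)).map (fun j : Nat => (x + w - 1, y + w - 1 - (k : Int) + (j : Int)))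
        ++ leftL x y w ++ upL x y w := by
  intro k
  induction k with
  | zero =>
    intro fuel _ hf
    obtain ⟨f, rfl⟩ : ∃ f, fuel = f + 1 := ⟨fuel - 1, by omega⟩
    rw [walk_turn x y w f (x + w - 1) (y + w - 1 - ((0 : Nat) : Int)) 0 1
        (inB_eq_false (by push_cast; omega))
        (inB_eq_true (by push_cast; omega)) (by push_cast; omega)]
    rw [show x + w - 1 + -(1 : Int) = x + (((w - 2).toNat : Nat) : Int) from by omega,
        show y + w - 1 - ((0 : Nat) : Int) + 0 = y + w - 1 from by push_cast; ring]
    rw [walk_left x y w hw (w - 2).toNat f (by omega) (by omega)]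
    rw [show (w - 2).toNat + 1 = (w - 1).toNat from by omega]
    rw [show List.range (0 + 1) = [0] from rfl, List.map_cons, List.map_nil]
    simp only [List.cons_append, List.nil_append]
    rw [List.cons.injEq]
    refine ⟨by simp only [Prod.mk.injEq, true_and, and_true]; omega, ?_⟩
    refine congrArg (fun l => l ++ upL x y w) ?_
    unfold leftL
    apply map_range_ext
    intro j _
    simp only [Prod.mk.injEq, true_and, and_true]
    omega
  | succ k ih =>
    intro fuel hk hf
    obtain ⟨f, rfl⟩ : ∃ f, fuel = f + 1 := ⟨fuel - 1, by omega⟩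
    rw [walk_straight x y w f (x + w - 1) (y + w - 1 - ((k + 1 : Nat) : Int)) 0 1
        (inB_eq_true (by push_cast; omega)) (by push_cast; omega)]
    rw [show x + w - 1 + (0 : Int) = x + w - 1 from by ring,
        show y + w - 1 - ((k + 1 : Nat) : Int) + 1 = y + w - 1 - (k : Int) from by
          push_cast; ring]
    rw [ih f (by push_cast at hk ⊢; omega) (by omega)]
    conv_rhs => rw [List.range_succ_eq_map, List.map_cons, List.map_map, List.cons_append,
      List.cons_append]
    rw [List.cons.injEq]
    refine ⟨by simp only [Prod.mk.injEq, true_and, and_true]; omega, ?_⟩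
    simp only [List.append_assoc]
    refine congrArg (fun l => l ++ (leftL x y w ++ upL x y w)) ?_
    apply map_range_ext
    intro j _
    simp only [Function.comp_apply, Prod.mk.injEq, true_and, and_true]
    omega

lemma walk_right (x y w : Int) (hw : 2 ≤ w) : ∀ (k fuel : Nat), (k : Int) ≤ w - 1 →
    (k + 1) + ((w - 1).toNat + (w - 1).toNat + (w - 2).toNat) ≤ fuel →
    walk x y w fuel (x + w - 1 - k) y 1 0
      = (List.range (k + 1)).map (fun j : Nat => (x + w - 1 - (k : Int) + (j : Int), y))
        ++ downL x y w ++ leftL x y w ++ upL x y w := by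
  intro k
  induction k with
  | zero =>
    intro fuel _ hf
    obtain ⟨f, rfl⟩ : ∃ f, fuel = f + 1 := ⟨fuel - 1, by omega⟩
    rw [walk_turn x y w f (x + w - 1 - ((0 : Nat) : Int)) y 1 0
        (inB_eq_false (by push_cast; omega))
        (inB_eq_true (by push_cast; omega)) (by push_cast; omega)]
    rw [show x + w - 1 - ((0 : Nat) : Int) + -(0 : Int) = x + w - 1 from by push_cast; ring,
        show y + (1 : Int) = y + w - 1 - (((w - 2).toNat : Nat) : Int) from by omega,
        show -(0 : Int) = 0 from neg_zero]
    rw [walk_down x y w hw (w - 2).toNat f (by omega) (by omega)]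
    rw [show (w - 2).toNat + 1 = (w - 1).toNat from by omega]
    rw [show List.range (0 + 1) = [0] from rfl, List.map_cons, List.map_nil]
    simp only [List.cons_append, List.nil_append]
    rw [List.cons.injEq]
    refine ⟨by simp only [Prod.mk.injEq, true_and, and_true]; omega, ?_⟩
    simp only [List.append_assoc]
    refine congrArg (fun l => l ++ (leftL x y w ++ upL x y w)) ?_
    unfold downL
    apply map_range_ext
    intro j _
    simp only [Prod.mk.injEq, true_and, and_true]
    omega
  | succ k ih =>
    intro fuel hk hf
    obtain ⟨f, rfl⟩ : ∃ f, fuel = f + 1 := ⟨fuel - 1, by omega⟩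
    rw [walk_straight x y w f (x + w - 1 - ((k + 1 : Nat) : Int)) y 1 0
        (inB_eq_true (by push_cast; omega)) (by push_cast; omega)]
    rw [show x + w - 1 - ((k + 1 : Nat) : Int) + 1 = x + w - 1 - (k : Int) from by
          push_cast; ring,
        show y + (0 : Int) = y from by ring]
    rw [ih f (by push_cast at hk ⊢; omega) (by omega)]
    conv_rhs => rw [List.range_succ_eq_map, List.map_cons, List.map_map, List.cons_append,
      List.cons_append, List.cons_append]
    rw [List.cons.injEq]
    refine ⟨by simp only [Prod.mk.injEq, true_and, and_true]; omega, ?_⟩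
    simp only [List.append_assoc]
    refine congrArg (fun l => l ++ (downL x y w ++ (leftL x y w ++ upL x y w))) ?_
    apply map_range_ext
    intro j _
    simp only [Function.comp_apply, Prod.mk.injEq, true_and, and_true]
    omega

-- ringL in the walker's four-sides form (holds for every w)
lemma ringL_eq_sides (x y w : Int) :
    ringL x y w = topL x y w ++ downL x y w ++ leftL x y w ++ upL x y w := by
  unfold ringL
  have e1 : seg1 x y w = topL x y w := by
    unfold seg1 topL
    rw [PySem.List.pyRange_one 0 w, List.map_map,
        show (w - 0).toNat = w.toNat from by omega]
    apply map_range_ext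
    intro j _
    simp only [Function.comp_apply, Prod.mk.injEq, true_and, and_true]
    omega
  have e2 : seg2 x y w = downL x y w := by
    unfold seg2 downL
    rw [PySem.List.pyRange_one 1 w, List.map_map]
    apply map_range_ext
    intro j _
    simp only [Function.comp_apply, Prod.mk.injEq, true_and, and_true]
    omega
  have e3 : seg3 x y w = leftL x y w := by
    unfold seg3 leftL
    rw [PySem.List.pyRange_one 1 w, List.map_map]
    apply map_range_ext
    intro j _
    simp only [Function.comp_apply, Prod.mk.injEq, true_and, and_true]
    omega
  have e4 : seg4 x y w = upL x y w := by
    unfold seg4 upL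
    rw [PySem.List.pyRange_one 1 (w - 1), List.map_map,
        show (w - 1 - 1).toNat = (w - 2).toNat from by omega]
    apply map_range_ext
    intro j _
    simp only [Function.comp_apply, Prod.mk.injEq, true_and, and_true]
    omega
  rw [e1, e2, e3, e4]

lemma walk_full (x y w : Int) (hw : 1 ≤ w) :
    walk x y w (4 * w).toNat x y 1 0 = ringL x y w := by
  rw [ringL_eq_sides]
  rcases eq_or_lt_of_le hw with hw1 | hw2
  · -- w = 1: one point, immediate double stop
    obtain rfl : w = 1 := hw1.symm
    obtain ⟨f, hfe⟩ : ∃ f, ((4 * (1 : Int)).toNat) = f + 1 := ⟨3, by decide⟩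
    rw [hfe, walk_turn_stop _ _ _ f _ _ _ _ (inB_eq_false (by omega))
        (Or.inr (inB_eq_false (by omega)))]
    rw [show topL x y 1 = [(x, y)] from by
          unfold topL
          rw [show ((1 : Int)).toNat = 1 from rfl, show List.range 1 = [0] from rfl,
              List.map_cons, List.map_nil]
          simp,
        show downL x y 1 = [] from by
          unfold downL; rw [show ((1 : Int) - 1).toNat = 0 from rfl]; rfl,
        show leftL x y 1 = [] from by
          unfold leftL; rw [show ((1 : Int) - 1).toNat = 0 from rfl]; rfl,
        show upL x y 1 = [] from by
          unfold upL; rw [show ((1 : Int) - 2).toNat = 0 from rfl]; rfl]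
    rfl
  · -- w ≥ 2: the four phases
    have h := walk_right x y w (by omega) (w - 1).toNat (4 * w).toNat (by omega) (by omega)
    rw [show x + w - 1 - (((w - 1).toNat : Nat) : Int) = x from by omega] at h
    rw [h, show (w - 1).toNat + 1 = w.toNat from by omega]
    refine congrArg (fun l => l ++ downL x y w ++ leftL x y w ++ upL x y w) ?_
    unfold topL
    apply map_range_ext
    intro j _
    simp only [Prod.mk.injEq, true_and, and_true]
    try omega

lemma ring_alt_eq_ringL (tl_loc : Int × Int) (width : Int) :
    ring_alt tl_loc width = ringL tl_loc.1 tl_loc.2 width := by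
  obtain ⟨x, y⟩ := tl_loc
  show ring_alt (x, y) width = ringL x y width
  unfold ring_alt
  by_cases hw : width < 1
  · rw [if_pos hw]
    have e1 : PySem.List.pyRange 0 width 1 = [] := PySem.List.pyRange_one_eq_nil (by omega)
    have e2 : PySem.List.pyRange 1 width 1 = [] := PySem.List.pyRange_one_eq_nil (by omega)
    have e4 : PySem.List.pyRange 1 (width - 1) 1 = [] := PySem.List.pyRange_one_eq_nil (by omega)
    simp [ringL, seg1, seg2, seg3, seg4, e1, e2, e4, PySem.Set.empty]
  · rw [if_neg hw]
    rw [show ((x, y) : Int × Int).1 = x from rfl, show ((x, y) : Int × Int).2 = y from rfl]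
    rw [walk_full x y width (by omega)]
    exact ofList_of_nodup _ (nodup_ringL x y width)

-- ===== VERDICT (by name: the statement is the Claim_ definition above) =====
theorem ring_spec : Claim_equal_ring := by
  intro tl_loc width _
  unfold Spec_ring
  rw [ring_eq_ringL, ring_alt_eq_ringL]
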